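-- pv_equiv track=rewrite | github.com/oksanaivanovaa/1sem_PythonProgramming_HWs | task4.py | drawborders
-- ===== SOURCE A (Python) =====
-- def drawborders(n):
--     if n == 1:
--         return ['+']
--     elif n == 2:
--         return ['++',
--                 '++']
--     else:
--         middle = drawborders(n-2)
--         for i in range(len(middle)):
--             middle[i] = '|' + middle[i] + '|'
--         plusminus = '+'
--         for i in range(n-2):
--             plusminus += '-'
--         plusminus += '+'
--         return [plusminus] + middle + [plusminus]
-- ===== SOURCE B (Python) =====
-- def drawborders(n):
--     def row(i):
--         r = min(i, n - 1 - i)          # ring depth of this row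
--         w = n - 2 * r                  # width of the innermost box on this row
--         if w <= 2:
--             mid = '+' * w
--         else:
--             mid = '+' + '-' * (w - 2) + '+'
--         return '|' * r + mid + '|' * r
--     return [row(i) for i in range(n)]
-- ===== Notes on version B (the rewrite author's own statement) =====
-- stated objective: faster
-- what changed: Replaces the O(n^3) peel-off recursion (each level re-copies and re-pads all inner rows) with a direct O(n^2) fill computing each character from its ring depth d = min(i, j, n-1-i, n-1-j).
-- crash fix: For n <= 0 A recurses forever (RecursionError); B returns [] since both comprehensions over range(n) are empty. — e.g. on drawborders(0): A raises RecursionError, B returns []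
import Mathlib
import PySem

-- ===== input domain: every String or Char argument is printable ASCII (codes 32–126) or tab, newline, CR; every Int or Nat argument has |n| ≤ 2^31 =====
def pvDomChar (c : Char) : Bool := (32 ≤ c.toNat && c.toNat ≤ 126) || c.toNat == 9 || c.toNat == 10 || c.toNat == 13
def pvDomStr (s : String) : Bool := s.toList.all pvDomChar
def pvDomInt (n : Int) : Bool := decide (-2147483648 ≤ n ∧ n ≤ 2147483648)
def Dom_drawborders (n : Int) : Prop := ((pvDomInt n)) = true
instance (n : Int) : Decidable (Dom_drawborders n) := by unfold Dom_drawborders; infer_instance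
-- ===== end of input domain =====

-- B replaces A's repeated-peel recursion (which re-copies every inner row at each level)
-- by a direct row-by-row build from the ring depth r = min(i, n-1-i).  Return values only.

-- ===== PORT A =====
-- A recurses with n-2; for n ≤ 0 the Python recursion never terminates (RecursionError),
-- so the port recurses on a Nat copy of n (the 'if 1 ≤ n' guard only makes it total;
-- those inputs are excluded by Pre_).
def drawAuxA : Nat → List String
  | 0 => []                                   -- unreachable under Pre_ (Python raises here)
  | 1 => ["+"]
  | 2 => ["++", "++"]
  | m + 3 =>
    let middle := (drawAuxA (m + 1)).map (fun s => "|" ++ s ++ "|")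
    let plusminus := ((List.range (m + 1)).foldl (fun s _ => s ++ "-") "+") ++ "+"
    [plusminus] ++ middle ++ [plusminus]

def drawborders (n : Int) : List String :=
  if 1 ≤ n then drawAuxA n.toNat else []

-- ===== PORT B =====
-- row(i) of Source B; 'c' * k is String.ofList (List.replicate k 'c').  All quantities are
-- nonnegative when 0 ≤ i < n, so Nat arithmetic is exact.
def rowB (n i : Nat) : String :=
  let r := min i (n - 1 - i)
  let w := n - 2 * r
  let mid := if w ≤ 2 then String.ofList (List.replicate w '+')
             else "+" ++ String.ofList (List.replicate (w - 2) '-') ++ "+"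
  String.ofList (List.replicate r '|') ++ mid ++ String.ofList (List.replicate r '|')

def drawborders_alt (n : Int) : List String :=
  (List.range n.toNat).map (fun i => rowB n.toNat i)

-- ===== PRECONDITION & SPEC =====
-- Pre_ excludes exactly n ≤ 0, where A's recursion never reaches a base case (RecursionError).
def Pre_drawborders (n : Int) : Prop := 1 ≤ n
instance (n : Int) : Decidable (Pre_drawborders n) := by unfold Pre_drawborders; infer_instance
def pvWitness_drawborders : Int := 3

-- For n ≤ 0 A raises RecursionError; B returns [] since the comprehension over range(n) is empty.
def Raises_drawborders (n : Int) : Prop := n ≤ 0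
instance (n : Int) : Decidable (Raises_drawborders n) := by unfold Raises_drawborders; infer_instance
def pvRaiseWitness_drawborders : Int := 0
def pvRaiseWitnessOut_drawborders : List String := []

def Spec_drawborders (n : Int) (out : List String) : Prop := out = drawborders_alt n
instance (n : Int) (out : List String) : Decidable (Spec_drawborders n out) := by unfold Spec_drawborders; infer_instance

-- ===== CLAIM (what is proved, stated in full; the proofs are below) =====
def Claim_equal_drawborders : Prop := ∀ (n : Int), Dom_drawborders n → Pre_drawborders n → Spec_drawborders n (drawborders n)
def Claim_raises_drawborders : Prop := (∀ (n : Int), Dom_drawborders n → Raises_drawborders n → ¬ Pre_drawborders n) ∧ (Dom_drawborders (pvRaiseWitness_drawborders) ∧ Raises_drawborders (pvRaiseWitness_drawborders) ∧ drawborders_alt (pvRaiseWitness_drawborders) = pvRaiseWitnessOut_drawborders)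

-- ===== LEMMAS AND PROOFS =====

-- B's row, on the List Char side
def rowL (n i : Nat) : List Char :=
  let r := min i (n - 1 - i)
  let w := n - 2 * r
  let mid := if w ≤ 2 then List.replicate w '+'
             else '+' :: (List.replicate (w - 2) '-' ++ ['+'])
  List.replicate r '|' ++ mid ++ List.replicate r '|'

lemma rowB_eq (n i : Nat) : rowB n i = String.ofList (rowL n i) := by
  simp only [rowB, rowL]
  split_ifs
  · simp [← String.ofList_append]
  · rw [show ("+" : String) = String.ofList ['+'] from rfl]
    simp only [← String.ofList_append]
    congr 1

lemma rowL_top (m : Nat) : rowL (m + 3) 0 = '+' :: (List.replicate (m + 1) '-' ++ ['+']) := by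
  simp only [rowL]
  rw [show min 0 (m + 3 - 1 - 0) = 0 from by omega,
      show m + 3 - 2 * 0 = m + 3 from by omega,
      if_neg (by omega)]
  simp

lemma rowL_bot (m : Nat) : rowL (m + 3) (m + 2) = '+' :: (List.replicate (m + 1) '-' ++ ['+']) := by
  simp only [rowL]
  rw [show min (m + 2) (m + 3 - 1 - (m + 2)) = 0 from by omega,
      show m + 3 - 2 * 0 = m + 3 from by omega,
      if_neg (by omega)]
  simp

-- c :: c^r = c^r ++ [c]  (used to slide the closing '|' of a wrapped row to the end)
lemma cons_replicate_comm (r : Nat) (c : Char) : c :: List.replicate r c = List.replicate r c ++ [c] := by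
  rw [← List.replicate_succ, List.replicate_succ']

lemma rowL_mid (m i : Nat) (hi : i ≤ m) :
    rowL (m + 3) (i + 1) = '|' :: (rowL (m + 1) i ++ ['|']) := by
  simp only [rowL]
  rw [show min (i + 1) (m + 3 - 1 - (i + 1)) = min i (m + 1 - 1 - i) + 1 from by omega,
      show m + 3 - 2 * (min i (m + 1 - 1 - i) + 1) = m + 1 - 2 * min i (m + 1 - 1 - i) from by omega]
  simp only [List.replicate_succ, List.cons_append, List.append_assoc]
  rw [cons_replicate_comm]

lemma pm_fold (k : Nat) :
    (List.range k).foldl (fun s _ => s ++ "-") "+" = String.ofList ('+' :: List.replicate k '-') := by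
  induction k with
  | zero => decide
  | succ k ih =>
    rw [List.range_succ, List.foldl_append, ih]
    show String.ofList ('+' :: List.replicate k '-') ++ String.ofList ['-'] = _
    rw [← String.ofList_append, List.replicate_succ']
    rfl

lemma alt_rec (m : Nat) :
    (List.range (m + 3)).map (fun i => rowB (m + 3) i) =
      [rowB (m + 3) 0] ++
        ((List.range (m + 1)).map (fun i => rowB (m + 1) i)).map (fun s => "|" ++ s ++ "|") ++
      [rowB (m + 3) 0] := by
  rw [show m + 3 = (m + 2) + 1 from rfl, List.range_succ, List.map_append,
      List.range_succ_eq_map, List.map_cons, List.map_map, List.map_map]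
  congr 1
  · congr 1
    apply List.map_congr_left
    intro i hi
    have hi' : i ≤ m := by simpa [Nat.lt_succ_iff] using hi
    show rowB (m + 3) (i + 1) = "|" ++ rowB (m + 1) i ++ "|"
    rw [rowB_eq, rowB_eq, rowL_mid m i hi',
        show ("|" : String) = String.ofList ['|'] from rfl, ← String.ofList_append, ← String.ofList_append]
    rfl
  · simp only [List.map_cons, List.map_nil]
    rw [rowB_eq, rowB_eq, rowL_top, rowL_bot]

lemma aux_eq : ∀ N : Nat, 1 ≤ N → drawAuxA N = (List.range N).map (fun i => rowB N i) := by
  intro N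
  induction N using Nat.strong_induction_on with
  | _ N ih =>
    match N with
    | 0 => intro h; omega
    | 1 => intro _; decide
    | 2 => intro _; decide
    | m + 3 =>
      intro _
      show [((List.range (m + 1)).foldl (fun s _ => s ++ "-") "+") ++ "+"] ++
          (drawAuxA (m + 1)).map (fun s => "|" ++ s ++ "|") ++
          [((List.range (m + 1)).foldl (fun s _ => s ++ "-") "+") ++ "+"] = _
      rw [ih (m + 1) (by omega) (by omega), pm_fold,
          show ("+" : String) = String.ofList ['+'] from rfl, ← String.ofList_append, alt_rec,
          rowB_eq, rowL_top]
      rfl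

-- ===== VERDICT (by name: the statement is the Claim_ definition above) =====
theorem drawborders_spec : Claim_equal_drawborders := by
  intro n _ hpre
  unfold Spec_drawborders drawborders drawborders_alt
  rw [if_pos (show (1:Int) ≤ n from hpre), aux_eq n.toNat (by unfold Pre_drawborders at hpre; omega)]

@[simp] theorem drawborders_raises : Claim_raises_drawborders := by
  unfold Claim_raises_drawborders
  exact ⟨by intro n _ h; unfold Raises_drawborders Pre_drawborders at *; omega, by decide⟩
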